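-- pv_equiv track=rewrite | github.com/littlebird34/MyProject | algPack.py | lastOccurMostFreqElem
-- ===== SOURCE A (Python) =====
-- def lastOccurMostFreqElem(lst):
--     """
--     Returns the index of the last occurence of the element that most frequently occurs
--     in list lst or -1 if lst is empty. If elements occur with equal frequency,
--     returns index of the last of these.
--     Examples:
--     >>> lastOccurMostFreqElem([0,0,2,2,0,2])
--     5
--     >>> lastOccurMostFreqElem([3,2,2,3])
--     3
--     >>> lastOccurMostFreqElem([])
--     -1
--     >>> lastOccurMostFreqElem([0,0,2,2,0,2])
--     5
--     >>> lastOccurMostFreqElem([3,2,2,3])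
--     3
--     >>> lastOccurMostFreqElem([2,2,2,3,3])
--     2
--     >>> lastOccurMostFreqElem([2,2,3,3,2])
--     4
--     >>> lastOccurMostFreqElem([2,2,3,3,2,4])
--     4
--     >>> lastOccurMostFreqElem([2,1,3,3,1,2,4,5])
--     5
--     >>> lastOccurMostFreqElem([1,1,3,3,2,2,4,4,5,1])
--     9
--     >>> lastOccurMostFreqElem([6,6,6,2,2,2,4,4,4,1,1,1])
--     11
--     """
--     result = 0
--     result2 = 0
--     if lst != []:
--         for i in range(len(lst)):
--             count = 0
--             for elem in lst:
--                 if elem == lst[i]: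
--                     count += 1
--             if count >= result2:
--                 result = i
--                 result2 = count
--         return result
--     else:
--         return -1
-- ===== SOURCE B (Python) =====
-- def lastOccurMostFreqElem(lst):
--     if not lst:
--         return -1
--     counts = {}
--     for x in lst:
--         counts[x] = counts.get(x, 0) + 1
--     m = max(counts.values())
--     best = 0
--     for i, x in enumerate(lst):
--         if counts[x] == m:
--             best = i
--     return best
-- ===== Notes on version B (the rewrite author's own statement) =====
-- stated objective: faster
-- what changed: Replaces the quadratic per-index recount (inner scan of the whole list for every index) by a single dict-building pass for frequencies, one max over the counts, and one forward scan keeping the last index whose element has the maximal count.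
import Mathlib
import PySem

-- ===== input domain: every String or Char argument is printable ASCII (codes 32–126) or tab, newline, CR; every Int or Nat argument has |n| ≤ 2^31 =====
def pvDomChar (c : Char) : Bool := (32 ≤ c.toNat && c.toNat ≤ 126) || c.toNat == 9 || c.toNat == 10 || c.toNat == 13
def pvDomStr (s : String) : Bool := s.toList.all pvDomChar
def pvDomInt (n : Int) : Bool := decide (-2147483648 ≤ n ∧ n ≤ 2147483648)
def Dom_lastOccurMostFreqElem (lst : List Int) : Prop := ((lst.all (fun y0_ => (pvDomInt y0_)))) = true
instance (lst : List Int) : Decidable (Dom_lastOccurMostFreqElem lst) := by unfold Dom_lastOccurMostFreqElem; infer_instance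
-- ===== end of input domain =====

-- B replaces A's quadratic per-index recount by one counting pass over a dict, one max,
-- and one forward scan keeping the last index of maximal count (objective: faster).

-- ===== PORT A =====
def lastOccurMostFreqElem (lst : List Int) : Int :=
  if lst ≠ [] then
    (List.foldl
      (fun (st : Int × Int) i =>
        let count : Int :=
          List.foldl (fun c elem => if some elem = PySem.List.pyGet? lst i then c + 1 else c) 0 lst
        if count ≥ st.2 then (i, count) else st)
      ((0 : Int), (0 : Int))
      (PySem.List.pyRange 0 (lst.length : Int) 1)).1
  else -1

-- ===== PORT B =====
-- counts[x] in Source B is a lookup of a key surely present (x ∈ lst); ported as getD with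
-- default 0, exact on every reachable lookup. m = max(counts.values()) is taken on a
-- provably nonempty list, ported by matching on PySem.List.max? (none is unreachable).
def lastOccurMostFreqElem_alt (lst : List Int) : Int :=
  if lst = [] then -1
  else
    let counts : PySem.Dict Int Int :=
      List.foldl (fun d x => d.insert x (d.getD x 0 + 1)) PySem.Dict.empty lst
    let m : Int :=
      match PySem.List.max? counts.values (fun v => v) with
      | some v => v
      | none => 0
    List.foldl (fun best p => if counts.getD p.2 0 = m then p.1 else best) 0
      (PySem.List.enumerate lst)

-- ===== PRECONDITION & SPEC =====
def Spec_lastOccurMostFreqElem (lst : List Int) (out : Int) : Prop := out = lastOccurMostFreqElem_alt lst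
instance (lst : List Int) (out : Int) : Decidable (Spec_lastOccurMostFreqElem lst out) := by unfold Spec_lastOccurMostFreqElem; infer_instance

-- ===== CLAIM (what is proved, stated in full; the proofs are below) =====
def Claim_equal_lastOccurMostFreqElem : Prop := ∀ (lst : List Int), Dom_lastOccurMostFreqElem lst → Spec_lastOccurMostFreqElem lst (lastOccurMostFreqElem lst)

-- ===== LEMMAS AND PROOFS =====

-- count of the element at index i (0 outside range; used only for i < lst.length)
def pvCnt (lst : List Int) (i : Nat) : Nat := lst.count (lst.getD i 0)

-- A's running maximum after scanning indices 0..k-1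
def pvRunMax (lst : List Int) : Nat → Nat
  | 0 => 0
  | k + 1 => if pvRunMax lst k ≤ pvCnt lst k then pvCnt lst k else pvRunMax lst k

-- A's running result after scanning indices 0..k-1
def pvRunIdx (lst : List Int) : Nat → Nat
  | 0 => 0
  | k + 1 => if pvRunMax lst k ≤ pvCnt lst k then k else pvRunIdx lst k

-- B's running best index, against the global maximum M
def pvRunBest (lst : List Int) (M : Nat) : Nat → Nat
  | 0 => 0
  | k + 1 => if pvCnt lst k = M then k else pvRunBest lst M k

theorem pv_foldl_count_eq (v : Int) (l : List Int) :
    List.foldl (fun c e => if e = v then c + 1 else c) (0 : Int) l = (l.count v : Int) := by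
  have h := PySem.List.foldl_count_if (fun e => e == v) l 0
  simpa [List.count, beq_iff_eq] using h

theorem pv_A_fold (lst : List Int) :
    ∀ k, k ≤ lst.length →
      List.foldl
        (fun (st : Int × Int) i =>
          let count : Int :=
            List.foldl (fun c elem => if some elem = PySem.List.pyGet? lst i then c + 1 else c) 0 lst
          if count ≥ st.2 then (i, count) else st)
        ((0 : Int), (0 : Int)) ((List.range k).map (fun (j : Nat) => (j : Int)))
      = ((pvRunIdx lst k : Int), (pvRunMax lst k : Int)) := by
  intro k hk
  induction k with
  | zero => simp [pvRunIdx, pvRunMax]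
  | succ k ih =>
    have hk' : k < lst.length := hk
    have hrec := ih (Nat.le_of_lt hk')
    rw [List.range_succ, List.map_append, List.foldl_append, hrec]
    have hget : PySem.List.pyGet? lst (k : Int) = some lst[k] := by
      rw [PySem.List.pyGet?_natCast]
      exact List.getElem?_eq_getElem hk'
    have hcnt : pvCnt lst k = lst.count lst[k] := by
      unfold pvCnt
      rw [List.getD_eq_getElem lst 0 hk']
    simp only [List.map_cons, List.map_nil, List.foldl_cons, List.foldl_nil, hget,
      Option.some.injEq, pv_foldl_count_eq, ge_iff_le]
    have h1 : pvRunIdx lst (k+1) = if pvRunMax lst k ≤ pvCnt lst k then k else pvRunIdx lst k := rfl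
    have h2 : pvRunMax lst (k+1) = if pvRunMax lst k ≤ pvCnt lst k then pvCnt lst k else pvRunMax lst k := rfl
    rw [h1, h2, hcnt]
    by_cases h : pvRunMax lst k ≤ List.count lst[k] lst
    · rw [if_pos (by exact_mod_cast h), if_pos h, if_pos h]
    · rw [if_neg (by intro hc; exact h (by exact_mod_cast hc)), if_neg h, if_neg h]

theorem pv_runIdx_le (lst : List Int) : ∀ k, pvRunIdx lst k ≤ k := by
  intro k
  induction k with
  | zero => simp [pvRunIdx]
  | succ k ih =>
    unfold pvRunIdx
    split
    · omega
    · omega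

theorem pv_runIdx_lt (lst : List Int) : ∀ k, 1 ≤ k → pvRunIdx lst k < k := by
  intro k hk
  cases k with
  | zero => omega
  | succ k =>
    unfold pvRunIdx
    split
    · omega
    · have := pv_runIdx_le lst k
      omega

theorem pv_runIdx_achieves (lst : List Int) : ∀ k, 1 ≤ k →
    pvCnt lst (pvRunIdx lst k) = pvRunMax lst k := by
  intro k hk
  induction k with
  | zero => omega
  | succ k ih =>
    have h1 : pvRunIdx lst (k+1) = if pvRunMax lst k ≤ pvCnt lst k then k else pvRunIdx lst k := rfl
    have h2 : pvRunMax lst (k+1) = if pvRunMax lst k ≤ pvCnt lst k then pvCnt lst k else pvRunMax lst k := rfl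
    rw [h1, h2]
    by_cases h : pvRunMax lst k ≤ pvCnt lst k
    · rw [if_pos h, if_pos h]
    · rw [if_neg h, if_neg h]
      cases k with
      | zero =>
        have h0 : pvRunMax lst 0 = 0 := rfl
        omega
      | succ k => exact ih (by omega)

theorem pv_cnt_le_runMax (lst : List Int) : ∀ k j, j < k → pvCnt lst j ≤ pvRunMax lst k := by
  intro k
  induction k with
  | zero => omega
  | succ k ih =>
    intro j hj
    unfold pvRunMax
    rcases Nat.lt_or_ge j k with h | h
    · have := ih j h; split <;> omega
    · have : j = k := by omega
      subst this; split <;> omega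

theorem pv_no_later (lst : List Int) : ∀ k j, pvRunIdx lst k < j → j < k →
    pvCnt lst j < pvRunMax lst k := by
  intro k
  induction k with
  | zero => omega
  | succ k ih =>
    intro j h1 h2
    unfold pvRunIdx at h1
    unfold pvRunMax
    by_cases h : pvRunMax lst k ≤ pvCnt lst k
    · rw [if_pos h] at h1; omega
    · rw [if_neg h] at h1
      rw [if_neg h]
      rcases Nat.lt_or_ge j k with hj | hj
      · exact ih j h1 hj
      · have : j = k := by omega
        subst this; omega

theorem pv_runBest_char (lst : List Int) (M : Nat) : ∀ k,
    (pvRunBest lst M k = 0 ∧ ∀ j, j < k → pvCnt lst j ≠ M) ∨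
    (pvRunBest lst M k < k ∧ pvCnt lst (pvRunBest lst M k) = M ∧
      ∀ j, pvRunBest lst M k < j → j < k → pvCnt lst j ≠ M) := by
  intro k
  induction k with
  | zero => left; exact ⟨rfl, by omega⟩
  | succ k ih =>
    unfold pvRunBest
    by_cases h : pvCnt lst k = M
    · rw [if_pos h]
      right
      exact ⟨Nat.lt_succ_self k, h, by omega⟩
    · rw [if_neg h]
      rcases ih with ⟨h0, hall⟩ | ⟨hlt, hach, hnone⟩
      · left
        refine ⟨h0, fun j hj => ?_⟩
        rcases Nat.lt_or_ge j k with hj' | hj'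
        · exact hall j hj'
        · have : j = k := by omega
          subst this; exact h
      · right
        refine ⟨Nat.lt_succ_of_lt hlt, hach, fun j h1 h2 => ?_⟩
        rcases Nat.lt_or_ge j k with hj' | hj'
        · exact hnone j h1 hj'
        · have : j = k := by omega
          subst this; exact h

theorem pv_B_fold (lst : List Int) (M : Nat) :
    ∀ k, k ≤ lst.length →
      List.foldl (fun (best : Int) (p : Int × Int) =>
          if ((lst.count p.2 : Int)) = (M : Int) then p.1 else best) 0
        (PySem.List.enumerate (lst.take k))
      = (pvRunBest lst M k : Int) := by
  intro k hk
  induction k with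
  | zero => simp [pvRunBest]
  | succ k ih =>
    have hk' : k < lst.length := hk
    have htake : lst.take (k + 1) = lst.take k ++ [lst[k]] := by
      rw [List.take_add_one, List.getElem?_eq_getElem hk']
      rfl
    have hlen : (lst.take k).length = k := by
      rw [List.length_take]; omega
    rw [htake, PySem.List.enumerate_append, List.foldl_append, ih (Nat.le_of_lt hk'), hlen]
    have hcnt : pvCnt lst k = lst.count lst[k] := by
      unfold pvCnt
      rw [List.getD_eq_getElem lst 0 hk']
    rw [PySem.List.enumerate_cons]
    simp only [PySem.List.enumerate_nil, List.foldl_cons, List.foldl_nil]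
    by_cases h : pvCnt lst k = M
    · rw [if_pos (by rw [hcnt] at h; exact_mod_cast h)]
      simp [pvRunBest, h]
    · rw [if_neg (by rw [hcnt] at h; intro hc; exact h (by exact_mod_cast hc))]
      simp [pvRunBest, h]

-- the max over the counter's values is the running maximum over all indices
theorem pv_max_values (lst : List Int) (hne : lst ≠ []) (m : Int)
    (hm : PySem.List.max? (PySem.Dict.counter lst).values (fun v => v) = some m) :
    m = (pvRunMax lst lst.length : Int) := by
  have hvals : (PySem.Dict.counter lst).values
      = (PySem.Set.ofList lst).map (fun k => (lst.count k : Int)) := by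
    show ((PySem.Dict.counter lst).items).map (·.2) = _
    rw [PySem.Dict.items_counter]
    simp
  have hmem := PySem.List.max?_mem hm
  have hmax := PySem.List.max?_isMax hm
  have hn1 : 1 ≤ lst.length := by
    cases lst with
    | nil => exact absurd rfl hne
    | cons a t => simp
  -- m is one of the counts, hence ≤ runMax
  have hub : m ≤ (pvRunMax lst lst.length : Int) := by
    rw [hvals] at hmem
    rcases List.mem_map.mp hmem with ⟨x, hx, hxm⟩
    have hxl : x ∈ lst := (PySem.Set.mem_ofList lst x).mp hx
    rcases List.mem_iff_getElem.mp hxl with ⟨j, hj, hjx⟩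
    have : pvCnt lst j = lst.count x := by
      unfold pvCnt
      rw [List.getD_eq_getElem lst 0 hj, hjx]
    have hle := pv_cnt_le_runMax lst lst.length j hj
    rw [this] at hle
    rw [← hxm]
    exact_mod_cast hle
  -- runMax is one of the counts, hence ≤ m
  have hlb : (pvRunMax lst lst.length : Int) ≤ m := by
    have hach := pv_runIdx_achieves lst lst.length hn1
    have hlt := pv_runIdx_lt lst lst.length hn1
    have hmem2 : ((lst.count (lst[pvRunIdx lst lst.length]'hlt) : Int))
        ∈ (PySem.Dict.counter lst).values := by
      rw [hvals]
      exact List.mem_map.mpr ⟨_, (PySem.Set.mem_ofList lst _).mpr (lst.getElem_mem hlt), rfl⟩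
    have := hmax _ hmem2
    have hc : pvCnt lst (pvRunIdx lst lst.length)
        = lst.count (lst[pvRunIdx lst lst.length]'hlt) := by
      unfold pvCnt
      rw [List.getD_eq_getElem lst 0 hlt]
    rw [← hach, hc]
    exact this
  omega

-- the last index achieving the running maximum is unique: A's and B's results agree
theorem pv_idx_eq (lst : List Int) (hne : lst ≠ []) :
    pvRunIdx lst lst.length = pvRunBest lst (pvRunMax lst lst.length) lst.length := by
  set n := lst.length with hn
  set M := pvRunMax lst n with hM
  have hn1 : 1 ≤ n := by
    cases lst with
    | nil => exact absurd rfl hne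
    | cons a t => simp [hn]
  have ha1 : pvRunIdx lst n < n := pv_runIdx_lt lst n hn1
  have ha2 : pvCnt lst (pvRunIdx lst n) = M := pv_runIdx_achieves lst n hn1
  have ha3 : ∀ j, pvRunIdx lst n < j → j < n → pvCnt lst j < M := pv_no_later lst n
  rcases pv_runBest_char lst M n with ⟨h0, hall⟩ | ⟨hb1, hb2, hb3⟩
  · exact absurd ha2 (hall _ ha1)
  · rcases Nat.lt_trichotomy (pvRunIdx lst n) (pvRunBest lst M n) with h | h | h
    · have := ha3 _ h hb1; omega
    · exact h
    · exact absurd ha2 (hb3 _ h ha1)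

-- ===== VERDICT (by name: the statement is the Claim_ definition above) =====
theorem lastOccurMostFreqElem_spec : Claim_equal_lastOccurMostFreqElem := by
  intro lst _
  unfold Spec_lastOccurMostFreqElem lastOccurMostFreqElem lastOccurMostFreqElem_alt
  by_cases hne : lst = []
  · simp [hne]
  · rw [if_pos hne, if_neg hne]
    rw [PySem.Dict.foldl_insert_getD_add_one_eq_counter]
    -- left side: A's fold
    rw [show ((lst.length : Int)) = ((lst.length : Nat) : Int) from rfl,
      PySem.List.pyRange_zero_natCast, pv_A_fold lst lst.length le_rfl]
    -- right side: obtain the max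
    have hvne : (PySem.Dict.counter lst).values ≠ [] := by
      have : (PySem.Dict.counter lst).values
          = (PySem.Set.ofList lst).map (fun k => (lst.count k : Int)) := by
        show ((PySem.Dict.counter lst).items).map (·.2) = _
        rw [PySem.Dict.items_counter]; simp
      rw [this]
      cases lst with
      | nil => exact absurd rfl hne
      | cons a t =>
        intro hmapnil
        have : a ∈ PySem.Set.ofList (a :: t) :=
          (PySem.Set.mem_ofList _ a).mpr (List.mem_cons_self)
        rw [List.map_eq_nil_iff.mp hmapnil] at this
        exact absurd this (List.not_mem_nil)
    obtain ⟨m, hm⟩ : ∃ m, PySem.List.max? (PySem.Dict.counter lst).values (fun v => v) = some m := by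
      cases hmax : PySem.List.max? (PySem.Dict.counter lst).values (fun v => v) with
      | none => exact absurd ((PySem.List.max?_eq_none_iff _ _).mp hmax) hvne
      | some v => exact ⟨v, rfl⟩
    simp only [hm, PySem.Dict.getD_counter]
    rw [pv_max_values lst hne m hm]
    have := pv_B_fold lst (pvRunMax lst lst.length) lst.length le_rfl
    rw [List.take_length] at this
    rw [this, pv_idx_eq lst hne]
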